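-- pv_equiv track=rewrite | github.com/06rajesh/Group16-CL-Team-lab-2020 | data/provider.py | construct_sentences
-- ===== SOURCE A (Python) =====
-- def construct_sentences(lines):
--     """
--     Reconstruct Sentences from all the lines read by CSV reader
--     :param lines, all lines read by CSV reader
--     :return: list of Sentences, List of POS list for each sentences and total Classes/Tags
--     """
--     sentences = []
--     sentences_pos = []
--
--     sent_tmp = []
--     sent_pos_tmp = []
--     all_pos = []
--
--     for line in lines:
--         if len(line) > 0:
--             pos = line[1]
--             sent_tmp.append(line[0])
--             sent_pos_tmp.append(pos)
--             all_pos.append(pos)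
--         else:
--             sentences.append(sent_tmp)
--             sentences_pos.append(sent_pos_tmp)
--             sent_tmp = []
--             sent_pos_tmp = []
--     classes = set(all_pos)
--
--     return sentences, sentences_pos, classes
-- ===== SOURCE B (Python) =====
-- def construct_sentences(lines):
--     """
--     Reconstruct Sentences from all the lines read by CSV reader
--     (boundary-index decomposition: find empty-line positions, slice groups).
--     """
--     lines = list(lines)
--     boundaries = [i for i, l in enumerate(lines) if len(l) == 0]
--     sentences = []
--     sentences_pos = []
--     start = 0
--     for b in boundaries:
--         group = lines[start:b]
--         sentences.append([l[0] for l in group])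
--         sentences_pos.append([l[1] for l in group])
--         start = b + 1
--     classes = set(l[1] for l in lines if len(l) > 0)
--     return sentences, sentences_pos, classes
-- ===== Notes on version B (the rewrite author's own statement) =====
-- stated objective: alternative
-- what changed: B first computes the list of empty-line boundary indices, then slices each sentence group out of the materialized line list and builds the POS-class set by a separate comprehension, instead of A's single pass with running sentence/POS/all-pos accumulators.
import Mathlib
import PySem

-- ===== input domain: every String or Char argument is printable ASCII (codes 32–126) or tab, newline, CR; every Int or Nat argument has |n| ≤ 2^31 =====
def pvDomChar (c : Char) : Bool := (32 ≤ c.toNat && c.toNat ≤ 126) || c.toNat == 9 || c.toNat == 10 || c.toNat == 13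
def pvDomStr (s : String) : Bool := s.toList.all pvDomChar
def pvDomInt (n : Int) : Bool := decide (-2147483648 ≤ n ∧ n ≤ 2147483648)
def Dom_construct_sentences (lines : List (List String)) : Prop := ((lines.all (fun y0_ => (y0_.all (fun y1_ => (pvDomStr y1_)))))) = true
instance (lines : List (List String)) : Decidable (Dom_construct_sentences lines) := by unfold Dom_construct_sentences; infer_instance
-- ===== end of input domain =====

-- B replaces A's single accumulator pass by boundary indices + slicing; objective: alternative decomposition (same cost).

-- ===== PORT A =====
def construct_sentences (lines : List (List String)) : List (List String) × List (List String) × List String :=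
  let st := lines.foldl
    (fun (s : List (List String) × List (List String) × List String × List String × List String) line =>
      if line.length > 0 then
        -- line[1]: Pre_ excludes length-1 lines, where Python raises IndexError
        let pos := PySem.List.pyGetD line 1 ""
        (s.1, s.2.1, s.2.2.1 ++ [PySem.List.pyGetD line 0 ""], s.2.2.2.1 ++ [pos], s.2.2.2.2 ++ [pos])
      else
        (s.1 ++ [s.2.2.1], s.2.1 ++ [s.2.2.2.1], [], [], s.2.2.2.2))
    ([], [], [], [], [])
  (st.1, st.2.1, PySem.Set.ofList st.2.2.2.2)

-- ===== PORT B =====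
def construct_sentences_alt (lines : List (List String)) : List (List String) × List (List String) × List String :=
  let boundaries : List Int := ((PySem.List.enumerate lines 0).filter (fun p => p.2.length == 0)).map (·.1)
  let r := boundaries.foldl
    (fun (s : List (List String) × List (List String) × Int) b =>
      let group := PySem.List.slice lines (some s.2.2) (some b)
      (s.1 ++ [group.map (fun l => PySem.List.pyGetD l 0 "")],
       s.2.1 ++ [group.map (fun l => PySem.List.pyGetD l 1 "")],
       b + 1))
    ([], [], 0)
  let classes := PySem.Set.ofList ((lines.filter (fun l => l.length > 0)).map (fun l => PySem.List.pyGetD l 1 ""))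
  (r.1, r.2.1, classes)

-- ===== PRECONDITION & SPEC =====
-- Pre_ excludes inputs containing a line of length exactly 1: there both Pythons raise IndexError on line[1].
def Pre_construct_sentences (lines : List (List String)) : Prop := ∀ l ∈ lines, l.length ≠ 1
instance (lines : List (List String)) : Decidable (Pre_construct_sentences lines) := by unfold Pre_construct_sentences; infer_instance
def pvWitness_construct_sentences : List (List String) :=
  [["the", "DT"], ["dog", "NN"], [], ["runs", "VB"], []]
def Spec_construct_sentences (lines : List (List String)) (out : List (List String) × List (List String) × List String) : Prop := out = construct_sentences_alt lines
instance (lines : List (List String)) (out : List (List String) × List (List String) × List String) : Decidable (Spec_construct_sentences lines out) := by unfold Spec_construct_sentences; infer_instance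

-- ===== CLAIM (what is proved, stated in full; the proofs are below) =====
def Claim_equal_construct_sentences : Prop := ∀ (lines : List (List String)), Dom_construct_sentences lines → Pre_construct_sentences lines → Spec_construct_sentences lines (construct_sentences lines)

-- ===== LEMMAS AND PROOFS =====

def pvF0 (l : List String) : String := PySem.List.pyGetD l 0 ""
def pvF1 (l : List String) : String := PySem.List.pyGetD l 1 ""

/-- The completed sentence groups (as lists of lines), current partial group `g`;
    the trailing partial group is dropped, exactly as both programs do. -/
def pvGroups (g : List (List String)) : List (List String) → List (List (List String))
  | [] => []
  | l :: ls => if l.length > 0 then pvGroups (g ++ [l]) ls else g :: pvGroups [] ls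

/-- The trailing (dropped) partial group. -/
def pvTail (g : List (List String)) : List (List String) → List (List String)
  | [] => g
  | l :: ls => if l.length > 0 then pvTail (g ++ [l]) ls else pvTail [] ls

def pvStepA (s : List (List String) × List (List String) × List String × List String × List String)
    (line : List String) : List (List String) × List (List String) × List String × List String × List String :=
  if line.length > 0 then
    let pos := PySem.List.pyGetD line 1 ""
    (s.1, s.2.1, s.2.2.1 ++ [PySem.List.pyGetD line 0 ""], s.2.2.2.1 ++ [pos], s.2.2.2.2 ++ [pos])
  else
    (s.1 ++ [s.2.2.1], s.2.1 ++ [s.2.2.2.1], [], [], s.2.2.2.2)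

def pvStepB (lines : List (List String)) (s : List (List String) × List (List String) × Int)
    (b : Int) : List (List String) × List (List String) × Int :=
  let group := PySem.List.slice lines (some s.2.2) (some b)
  (s.1 ++ [group.map (fun l => PySem.List.pyGetD l 0 "")],
   s.2.1 ++ [group.map (fun l => PySem.List.pyGetD l 1 "")],
   b + 1)

def pvBdy (ls : List (List String)) (k : Int) : List Int :=
  ((PySem.List.enumerate ls k).filter (fun p => p.2.length == 0)).map (·.1)

lemma pvBdy_nil (k : Int) : pvBdy [] k = [] := rfl

lemma pvBdy_cons (l : List String) (ls : List (List String)) (k : Int) :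
    pvBdy (l :: ls) k = (if l.length = 0 then [k] else []) ++ pvBdy ls (k + 1) := by
  by_cases h : l.length = 0 <;>
    simp [pvBdy, PySem.List.enumerate_cons, h]

lemma foldA_spec (ls : List (List String)) : ∀ (g : List (List String)) ss sp ap,
    ls.foldl pvStepA (ss, sp, g.map pvF0, g.map pvF1, ap)
      = (ss ++ (pvGroups g ls).map (List.map pvF0),
         sp ++ (pvGroups g ls).map (List.map pvF1),
         (pvTail g ls).map pvF0, (pvTail g ls).map pvF1,
         ap ++ (ls.filter (fun l => l.length > 0)).map pvF1) := by
  induction ls with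
  | nil => intro g ss sp ap; simp [pvGroups, pvTail]
  | cons l ls ih =>
    intro g ss sp ap
    by_cases h : l.length > 0
    · have : pvStepA (ss, sp, g.map pvF0, g.map pvF1, ap) l
          = (ss, sp, (g ++ [l]).map pvF0, (g ++ [l]).map pvF1, ap ++ [pvF1 l]) := by
        simp [pvStepA, h, pvF0, pvF1]
      simp only [List.foldl_cons, this, ih (g ++ [l]) ss sp (ap ++ [pvF1 l])]
      simp [pvGroups, pvTail, h]
    · have : pvStepA (ss, sp, g.map pvF0, g.map pvF1, ap) l
          = (ss ++ [g.map pvF0], sp ++ [g.map pvF1],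
             ([] : List (List String)).map pvF0, ([] : List (List String)).map pvF1, ap) := by
        simp [pvStepA, h]
      simp only [List.foldl_cons, this, ih [] (ss ++ [g.map pvF0]) (sp ++ [g.map pvF1]) ap]
      simp [pvGroups, pvTail, h]

lemma foldB_spec (ls : List (List String)) : ∀ (pre g : List (List String)) ss sp,
    ((pvBdy ls ((pre.length : Int) + (g.length : Int))).foldl
        (pvStepB (pre ++ g ++ ls)) (ss, sp, (pre.length : Int)))
      = (ss ++ (pvGroups g ls).map (List.map pvF0),
         sp ++ (pvGroups g ls).map (List.map pvF1),
         (((pvBdy ls ((pre.length : Int) + (g.length : Int))).foldl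
            (pvStepB (pre ++ g ++ ls)) (ss, sp, (pre.length : Int)))).2.2) := by
  induction ls with
  | nil => intro pre g ss sp; simp [pvBdy_nil, pvGroups]
  | cons l ls ih =>
    intro pre g ss sp
    by_cases h : l.length = 0
    · -- boundary hit: group = g
      have hsl : PySem.List.slice (pre ++ g ++ l :: ls) (some (pre.length : Int))
          (some ((pre.length : Int) + (g.length : Int))) = g := by
        rw [List.append_assoc, PySem.List.slice_natCast_add, List.drop_left, List.take_left]
      have hstep : pvStepB (pre ++ g ++ (l :: ls)) (ss, sp, (pre.length : Int))
            ((pre.length : Int) + (g.length : Int))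
          = (ss ++ [g.map pvF0], sp ++ [g.map pvF1], (pre.length : Int) + (g.length : Int) + 1) := by
        simp only [pvStepB, hsl]
        rfl
      have hlen : (pre.length : Int) + (g.length : Int) + 1 = ((pre ++ g ++ [l]).length : Int) := by
        simp; ring
      have hfull : pre ++ g ++ (l :: ls) = (pre ++ g ++ [l]) ++ ls := by
        simp
      have key := ih (pre ++ g ++ [l]) [] (ss ++ [g.map pvF0]) (sp ++ [g.map pvF1])
      simp only [List.append_nil, List.length_nil, Nat.cast_zero, add_zero] at key
      rw [pvBdy_cons, if_pos h, List.singleton_append, List.foldl_cons, hstep, hlen, hfull, key]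
      simp [pvGroups, h]
    · -- non-empty line: extend the current group
      have h' : l.length > 0 := Nat.pos_of_ne_zero h
      have hlen : (pre.length : Int) + (g.length : Int) + 1
          = (pre.length : Int) + (((g ++ [l]).length : Int)) := by
        simp; ring
      have hfull : pre ++ g ++ (l :: ls) = pre ++ (g ++ [l]) ++ ls := by
        simp
      have key := ih pre (g ++ [l]) ss sp
      rw [pvBdy_cons, if_neg h, List.nil_append, hlen, hfull, key]
      simp [pvGroups, h']

-- the ports' inline lambdas are exactly pvStepA / pvStepB
lemma stepA_eq :
    (fun (s : List (List String) × List (List String) × List String × List String × List String) line =>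
      if line.length > 0 then
        let pos := PySem.List.pyGetD line 1 ""
        (s.1, s.2.1, s.2.2.1 ++ [PySem.List.pyGetD line 0 ""], s.2.2.2.1 ++ [pos], s.2.2.2.2 ++ [pos])
      else
        (s.1 ++ [s.2.2.1], s.2.1 ++ [s.2.2.2.1], [], [], s.2.2.2.2)) = pvStepA := rfl

lemma stepB_eq (lines : List (List String)) :
    (fun (s : List (List String) × List (List String) × Int) b =>
      let group := PySem.List.slice lines (some s.2.2) (some b)
      (s.1 ++ [group.map (fun l => PySem.List.pyGetD l 0 "")],
       s.2.1 ++ [group.map (fun l => PySem.List.pyGetD l 1 "")],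
       b + 1)) = pvStepB lines := rfl

-- ===== VERDICT (by name: the statement is the Claim_ definition above) =====
theorem construct_sentences_spec : Claim_equal_construct_sentences := by
  intro lines _ _
  unfold Spec_construct_sentences construct_sentences construct_sentences_alt
  rw [stepA_eq, stepB_eq]
  have hA := foldA_spec lines [] [] [] []
  simp only [List.map_nil, List.nil_append] at hA
  have hB := foldB_spec lines [] [] [] []
  simp only [List.length_nil, List.nil_append, Nat.cast_zero, add_zero] at hB
  have hbdy : ((PySem.List.enumerate lines 0).filter (fun p => p.2.length == 0)).map (·.1)
      = pvBdy lines 0 := rfl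
  dsimp only
  rw [hA, hbdy, hB]
  rfl
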